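-- pv_equiv track=rewrite | github.com/kasterra/mahjong-vision | mahjong-vision-calculater/data_calculator/split_data.py | split_huro_dfs
-- ===== SOURCE A (Python) =====
-- def is_valid_chi(hand1, hand2, hand3):
--     if hand1[1] == 'z' or hand2[1] == 'z' or hand3[1] == 'z':
--         return False
--     if hand1[1] != hand2[1] or hand1[1] != hand3[1] or hand2[1] != hand3[1]:
--         return False
--     hand = sorted([hand1, hand2, hand3])
--     return int(hand1[0])+1 == int(hand2[0]) and int(hand2[0])+1 == int(hand3[0])
--
-- def all_same(*arg):
--     return all(arg[0] == i for i in arg)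
--
-- def split_huro_dfs(huro_hand: list, idx: int, size: int, result: dict):
--     if size == 0:
--         return idx == len(huro_hand)
--     # chi
--     if idx+2 < len(huro_hand) and is_valid_chi(huro_hand[idx], huro_hand[idx+1], huro_hand[idx+2]):
--         result['chi'].append([huro_hand[idx], huro_hand[idx+1], huro_hand[idx+2]])
--         if split_huro_dfs(huro_hand, idx+3, size-1, result):
--             return True
--         result['chi'].pop()
--     # pong
--     if idx+2 < len(huro_hand) and all_same(huro_hand[idx], huro_hand[idx+1], huro_hand[idx+2]):
--         result['pong'].append([huro_hand[idx]]*3)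
--         if split_huro_dfs(huro_hand, idx+3, size-1, result):
--             return True
--         result['pong'].pop()
--
--     # minkkang
--     if idx+3 < len(huro_hand) and all_same(huro_hand[idx], huro_hand[idx+1], huro_hand[idx+2], huro_hand[idx+3]):
--         result['minkkang'].append([huro_hand[idx]]*4)
--         if split_huro_dfs(huro_hand, idx+3, size-1, result):
--             return True
--         result['minkkang'].pop()
--
--     # ankkang
--     if idx+1 < len(huro_hand) and all_same(huro_hand[idx], huro_hand[idx+1]):
--         result['ankkang'].append([huro_hand[idx]]*4)
--         if split_huro_dfs(huro_hand, idx+3, size-1, result):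
--             return True
--         result['ankkang'].pop()
--     return False
-- ===== SOURCE B (Python) =====
-- # Single linear scan instead of backtracking DFS: every branch of A recurses on the
-- # identical (idx+3, size-1) subproblem, so reachability is decided by picking the first
-- # matching meld at each step; result is mutated (same net effect as A) only on success.
--
-- def _is_chi(a, b, c):
--     return (a[1] != 'z' and a[1] == b[1] and b[1] == c[1]
--             and int(a[0]) + 1 == int(b[0]) and int(b[0]) + 1 == int(c[0]))
--
--
-- def _meld_at(huro_hand, i, n):
--     if i + 2 < n and _is_chi(huro_hand[i], huro_hand[i + 1], huro_hand[i + 2]):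
--         return ('chi', [huro_hand[i], huro_hand[i + 1], huro_hand[i + 2]])
--     if i + 2 < n and huro_hand[i] == huro_hand[i + 1] == huro_hand[i + 2]:
--         return ('pong', [huro_hand[i]] * 3)
--     if i + 3 < n and huro_hand[i] == huro_hand[i + 1] == huro_hand[i + 2] == huro_hand[i + 3]:
--         return ('minkkang', [huro_hand[i]] * 4)
--     if i + 1 < n and huro_hand[i] == huro_hand[i + 1]:
--         return ('ankkang', [huro_hand[i]] * 4)
--     return None
--
--
-- def split_huro_dfs(huro_hand: list, idx: int, size: int, result: dict):
--     n = len(huro_hand)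
--     melds = []
--     i, s = idx, size
--     while s != 0:
--         kind = _meld_at(huro_hand, i, n)
--         if kind is None:
--             return False
--         melds.append(kind)
--         i += 3
--         s -= 1
--     if i != n:
--         return False
--     for key, group in melds:
--         result[key].append(group)
--     return True
-- ===== Notes on version B (the rewrite author's own statement) =====
-- stated objective: alternative
-- what changed: All four branches of A's backtracking DFS recurse on the identical (idx+3, size-1) subproblem, so B replaces the backtracking recursion by a single linear scan that takes the first matching meld at each position and touches result only once, on success.
-- outside the precondition, e.g. on split_huro_dfs(['aa', 'bb', 'cc', 'x', 'y', 'z'], 0, 2, {}): A returns False, B returns False; on split_huro_dfs(['aa', 'bb', 'cc', '5p', '5p'], 0, 2, {}): A returns False, B returns False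
import Mathlib
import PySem

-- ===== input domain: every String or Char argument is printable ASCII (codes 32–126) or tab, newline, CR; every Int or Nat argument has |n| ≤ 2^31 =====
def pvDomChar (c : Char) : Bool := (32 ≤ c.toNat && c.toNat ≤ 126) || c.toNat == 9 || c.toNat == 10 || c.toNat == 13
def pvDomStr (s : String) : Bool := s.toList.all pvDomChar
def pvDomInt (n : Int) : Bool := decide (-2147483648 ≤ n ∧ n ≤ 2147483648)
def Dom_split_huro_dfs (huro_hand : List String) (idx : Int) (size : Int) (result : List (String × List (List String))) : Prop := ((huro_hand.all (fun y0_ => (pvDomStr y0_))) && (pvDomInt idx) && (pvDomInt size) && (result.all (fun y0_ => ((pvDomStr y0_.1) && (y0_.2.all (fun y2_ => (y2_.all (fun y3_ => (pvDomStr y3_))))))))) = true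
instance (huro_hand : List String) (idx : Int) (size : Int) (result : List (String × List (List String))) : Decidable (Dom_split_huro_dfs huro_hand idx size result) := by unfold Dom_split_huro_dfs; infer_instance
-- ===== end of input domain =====

-- B replaces A's backtracking DFS (whose four branches all recurse on the identical
-- (idx+3, size-1) subproblem) by one linear scan taking the first matching meld at each
-- position; the equivalence proved is about the RETURN value — both Pythons also leave
-- `result` with the same net contents (appended only on a successful split).

-- ===== PORT A =====  (pvGetA / pvTileNumA / pvDictAppendA are the shared ports of the
-- identical primitive expressions huro_hand[i], int(s[0]) and result[k].append(g) that
-- BOTH Pythons use verbatim)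
-- huro_hand[i]: exact under Pre_ (0 ≤ idx keeps every evaluated index in range)
def pvGetA (h : List String) (i : Int) : String := (PySem.List.pyGet? h i).getD ""

-- int(s[0]): exact under Pre_ (first char of every tile is a digit; Python would raise otherwise)
def pvTileNumA (s : String) : Int :=
  ((PySem.Str.pyGet? s 0).bind (fun c => PySem.Int.ofStr? (String.mk [c]))).getD 0

-- s[1] as PySem.Str.pyGet? (length ≥ 2 under Pre_; Python raises IndexError otherwise)
def is_valid_chi (h1 h2 h3 : String) : Bool :=
  if PySem.Str.pyGet? h1 1 = some 'z' ∨ PySem.Str.pyGet? h2 1 = some 'z' ∨ PySem.Str.pyGet? h3 1 = some 'z' then false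
  else if PySem.Str.pyGet? h1 1 ≠ PySem.Str.pyGet? h2 1 ∨ PySem.Str.pyGet? h1 1 ≠ PySem.Str.pyGet? h3 1 ∨ PySem.Str.pyGet? h2 1 ≠ PySem.Str.pyGet? h3 1 then false
  else
    let _hand := PySem.List.sorted [h1, h2, h3] (fun x => x) false  -- dead code in A, kept
    decide (pvTileNumA h1 + 1 = pvTileNumA h2 ∧ pvTileNumA h2 + 1 = pvTileNumA h3)

def all_same (args : List String) : Bool := args.all (fun i => args.headD "" == i)

-- result['k'].append(g): append to the value of the first pair with key k
-- (exact when the key is present; Python raises KeyError otherwise — excluded by Pre_)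
def pvDictAppendA (r : List (String × List (List String))) (k : String) (g : List String) :
    List (String × List (List String)) :=
  match r with
  | [] => []
  | (k', v) :: rest => if k' = k then (k', v ++ [g]) :: rest else (k', v) :: pvDictAppendA rest k g

mutual
def split_huro_dfs (huro_hand : List String) (idx : Int) (size : Int) (result : List (String × List (List String))) : Bool :=
  if size = 0 then decide (idx = (huro_hand.length : Int))
  else pvTryChi huro_hand idx size result
termination_by ((huro_hand.length + 2 - idx).toNat, 5)

def pvTryChi (h : List String) (idx size : Int) (r : List (String × List (List String))) : Bool :=
  if hc : idx + 2 < (h.length : Int) ∧ is_valid_chi (pvGetA h idx) (pvGetA h (idx+1)) (pvGetA h (idx+2)) = true then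
    if split_huro_dfs h (idx+3) (size-1) (pvDictAppendA r "chi" [pvGetA h idx, pvGetA h (idx+1), pvGetA h (idx+2)]) then true
    else pvTryPong h idx size r
  else pvTryPong h idx size r
termination_by ((h.length + 2 - idx).toNat, 4)

def pvTryPong (h : List String) (idx size : Int) (r : List (String × List (List String))) : Bool :=
  if hc : idx + 2 < (h.length : Int) ∧ all_same [pvGetA h idx, pvGetA h (idx+1), pvGetA h (idx+2)] = true then
    if split_huro_dfs h (idx+3) (size-1) (pvDictAppendA r "pong" [pvGetA h idx, pvGetA h idx, pvGetA h idx]) then true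
    else pvTryMin h idx size r
  else pvTryMin h idx size r
termination_by ((h.length + 2 - idx).toNat, 3)

def pvTryMin (h : List String) (idx size : Int) (r : List (String × List (List String))) : Bool :=
  if hc : idx + 3 < (h.length : Int) ∧ all_same [pvGetA h idx, pvGetA h (idx+1), pvGetA h (idx+2), pvGetA h (idx+3)] = true then
    if split_huro_dfs h (idx+3) (size-1) (pvDictAppendA r "minkkang" [pvGetA h idx, pvGetA h idx, pvGetA h idx, pvGetA h idx]) then true
    else pvTryAnk h idx size r
  else pvTryAnk h idx size r
termination_by ((h.length + 2 - idx).toNat, 2)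

def pvTryAnk (h : List String) (idx size : Int) (r : List (String × List (List String))) : Bool :=
  if hc : idx + 1 < (h.length : Int) ∧ all_same [pvGetA h idx, pvGetA h (idx+1)] = true then
    if split_huro_dfs h (idx+3) (size-1) (pvDictAppendA r "ankkang" [pvGetA h idx, pvGetA h idx, pvGetA h idx, pvGetA h idx]) then true
    else false
  else false
termination_by ((h.length + 2 - idx).toNat, 1)
end

-- ===== PORT B =====
def pvIsChiB (a b c : String) : Bool :=
  decide (PySem.Str.pyGet? a 1 ≠ some 'z' ∧ PySem.Str.pyGet? a 1 = PySem.Str.pyGet? b 1 ∧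
          PySem.Str.pyGet? b 1 = PySem.Str.pyGet? c 1 ∧
          pvTileNumA a + 1 = pvTileNumA b ∧ pvTileNumA b + 1 = pvTileNumA c)

def pvMeldAt (h : List String) (i : Int) : Option (String × List String) :=
  if i + 2 < (h.length : Int) ∧ pvIsChiB (pvGetA h i) (pvGetA h (i+1)) (pvGetA h (i+2)) = true then
    some ("chi", [pvGetA h i, pvGetA h (i+1), pvGetA h (i+2)])
  else if i + 2 < (h.length : Int) ∧ pvGetA h i = pvGetA h (i+1) ∧ pvGetA h (i+1) = pvGetA h (i+2) then
    some ("pong", [pvGetA h i, pvGetA h i, pvGetA h i])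
  else if i + 3 < (h.length : Int) ∧ pvGetA h i = pvGetA h (i+1) ∧ pvGetA h (i+1) = pvGetA h (i+2) ∧ pvGetA h (i+2) = pvGetA h (i+3) then
    some ("minkkang", [pvGetA h i, pvGetA h i, pvGetA h i, pvGetA h i])
  else if i + 1 < (h.length : Int) ∧ pvGetA h i = pvGetA h (i+1) then
    some ("ankkang", [pvGetA h i, pvGetA h i, pvGetA h i, pvGetA h i])
  else none

-- used by altLoop's termination proof
theorem pvMeldAt_bound (h : List String) (i : Int) (kg : String × List String)
    (hm : pvMeldAt h i = some kg) : i + 1 < (h.length : Int) := by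
  unfold pvMeldAt at hm
  split_ifs at hm with h1 h2 h3 h4 <;> omega

def pvAltLoop (h : List String) (i s : Int) (acc : List (String × List String)) :
    Option (Int × List (String × List String)) :=
  if s = 0 then some (i, acc)
  else
    match hm : pvMeldAt h i with
    | none => none
    | some kg => pvAltLoop h (i+3) (s-1) (acc ++ [kg])
termination_by (h.length + 2 - i).toNat
decreasing_by have := pvMeldAt_bound h i _ hm; omega

def split_huro_dfs_alt (huro_hand : List String) (idx : Int) (size : Int) (result : List (String × List (List String))) : Bool :=
  match pvAltLoop huro_hand idx size [] with
  | none => false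
  | some (i, melds) =>
    if i ≠ (huro_hand.length : Int) then false
    else
      let _r := melds.foldl (fun r kg => pvDictAppendA r kg.1 kg.2) result
      true

-- ===== PRECONDITION & SPEC =====
-- helpers for Pre_ only (independent of both ports): huro_hand[j] with Python's negative-
-- index wrap and "" out of range, s[i] with a default, and the ASCII digit test
def preTile (h : List String) (j : Int) : String :=
  let jj := if j < 0 then j + (h.length : Int) else j
  if 0 ≤ jj ∧ jj < (h.length : Int) then h.getD jj.toNat "" else ""

def preChar (s : String) (i : Nat) : Char := s.toList.getD i ' '

abbrev preDigit (ch : Char) : Bool := decide ('0' ≤ ch) && decide (ch ≤ '9')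

-- What a meld window starting at p must look like so that A's checks at p cannot raise:
-- in-range accesses, tiles of length ≥ 2 with digit ranks where the suit test reaches
-- int(), and the meld key present in result whenever the window's meld condition holds.
def preWindowOK (h : List String) (result : List (String × List (List String))) (p : Int) : Bool :=
  let n : Int := h.length
  let a := preTile h p
  let b := preTile h (p+1)
  let c := preTile h (p+2)
  let d := preTile h (p+3)
  let keys := result.map Prod.fst
  let suitsEq := preChar a 1 == preChar b 1 && preChar b 1 == preChar c 1 && preChar a 1 != 'z'
  (!decide (p + 1 < n) || decide (-n ≤ p)) &&
  (!decide (p + 2 < n) ||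
    (decide (2 ≤ a.toList.length) && decide (2 ≤ b.toList.length) && decide (2 ≤ c.toList.length) &&
      (!suitsEq || (preDigit (preChar a 0) && preDigit (preChar b 0) && preDigit (preChar c 0))))) &&
  (!(decide (p + 2 < n) && suitsEq && preDigit (preChar a 0) &&
      decide ((preChar a 0).toNat + 1 = (preChar b 0).toNat) &&
      decide ((preChar b 0).toNat + 1 = (preChar c 0).toNat) ) || keys.contains "chi") &&
  (!(decide (p + 2 < n) && a == b && b == c) || keys.contains "pong") &&
  (!(decide (p + 3 < n) && a == b && b == c && c == d) || keys.contains "minkkang") &&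
  (!(decide (p + 1 < n) && a == b) || keys.contains "ankkang")

-- Pre_ admits the inputs on which A cannot raise: a start index that is not below -len
-- while tiles are still scanned, and every meld window the scan could visit (all lie at
-- idx+3k, k < size when size ≥ 0, and within the list) is safe per preWindowOK.  It is
-- slightly conservative: it also checks windows a run may stop before reaching, so a few
-- inputs on which A returns False early are excluded (A and B agree there as well).
def Pre_split_huro_dfs (huro_hand : List String) (idx : Int) (size : Int) (result : List (String × List (List String))) : Prop :=
  ((idx < -(huro_hand.length : Int)) → (size = 0 ∨ (huro_hand.length : Int) ≤ idx + 1)) ∧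
  (∀ k ∈ List.range (huro_hand.length + 1), (size < 0 ∨ (k : Int) < size) → preWindowOK huro_hand result (idx + 3 * (k : Int)) = true)
instance (huro_hand : List String) (idx : Int) (size : Int) (result : List (String × List (List String))) : Decidable (Pre_split_huro_dfs huro_hand idx size result) := by unfold Pre_split_huro_dfs; infer_instance

def pvWitness_split_huro_dfs : List String × Int × Int × (List (String × List (List String))) :=
  (["1m", "2m", "3m"], 0, 1, [("chi", []), ("pong", []), ("minkkang", []), ("ankkang", [])])

def Spec_split_huro_dfs (huro_hand : List String) (idx : Int) (size : Int) (result : List (String × List (List String))) (out : Bool) : Prop := out = split_huro_dfs_alt huro_hand idx size result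
instance (huro_hand : List String) (idx : Int) (size : Int) (result : List (String × List (List String))) (out : Bool) : Decidable (Spec_split_huro_dfs huro_hand idx size result out) := by unfold Spec_split_huro_dfs; infer_instance

-- ===== CLAIM (what is proved, stated in full; the proofs are below) =====
def Claim_equal_split_huro_dfs : Prop := ∀ (huro_hand : List String) (idx : Int) (size : Int) (result : List (String × List (List String))), Dom_split_huro_dfs huro_hand idx size result → Pre_split_huro_dfs huro_hand idx size result → Spec_split_huro_dfs huro_hand idx size result (split_huro_dfs huro_hand idx size result)

-- ===== LEMMAS AND PROOFS =====

-- pure chain recurrence both ports compute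
def pvSim (h : List String) (i s : Int) : Bool :=
  if s = 0 then decide (i = (h.length : Int))
  else if hm : (pvMeldAt h i).isSome = true then pvSim h (i+3) (s-1)
  else false
termination_by (h.length + 2 - i).toNat
decreasing_by
  obtain ⟨kg, hkg⟩ := Option.isSome_iff_exists.mp hm
  have := pvMeldAt_bound h i kg hkg
  omega

theorem pv_chi_eq (a b c : String) :
    is_valid_chi a b c = pvIsChiB a b c := by
  unfold is_valid_chi pvIsChiB
  split_ifs with h1 h2
  · symm
    simp only [decide_eq_false_iff_not]
    rintro ⟨hz, he12, he23, -, -⟩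
    rcases h1 with h | h | h
    · exact hz h
    · exact hz (he12.trans h)
    · exact hz ((he12.trans he23).trans h)
  · symm
    simp only [decide_eq_false_iff_not]
    rintro ⟨-, he12, he23, -, -⟩
    rcases h2 with h | h | h
    · exact h he12
    · exact h (he12.trans he23)
    · exact h he23
  · push_neg at h1 h2
    simp only [decide_eq_decide]
    constructor
    · rintro ⟨hn1, hn2⟩; exact ⟨h1.1, h2.1, h2.2.2, hn1, hn2⟩
    · rintro ⟨-, -, -, hn1, hn2⟩; exact ⟨hn1, hn2⟩

theorem pv_same3 (a b c : String) :
    all_same [a, b, c] = decide (a = b ∧ b = c) := by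
  simp [all_same]
  by_cases hab : a = b <;> by_cases hbc : b = c <;> simp_all

theorem pv_same4 (a b c d : String) :
    all_same [a, b, c, d] = decide (a = b ∧ b = c ∧ c = d) := by
  simp [all_same]
  by_cases hab : a = b <;> by_cases hbc : b = c <;> by_cases hcd : c = d <;> simp_all

theorem pv_same2 (a b : String) :
    all_same [a, b] = decide (a = b) := by
  simp [all_same]
  by_cases hab : a = b <;> simp_all

theorem pv_conds_eq_isSome (h : List String) (i : Int) :
    (decide (i + 2 < (h.length : Int) ∧ is_valid_chi (pvGetA h i) (pvGetA h (i+1)) (pvGetA h (i+2)) = true) ||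
     decide (i + 2 < (h.length : Int) ∧ all_same [pvGetA h i, pvGetA h (i+1), pvGetA h (i+2)] = true) ||
     decide (i + 3 < (h.length : Int) ∧ all_same [pvGetA h i, pvGetA h (i+1), pvGetA h (i+2), pvGetA h (i+3)] = true) ||
     decide (i + 1 < (h.length : Int) ∧ all_same [pvGetA h i, pvGetA h (i+1)] = true)) = (pvMeldAt h i).isSome := by
  unfold pvMeldAt
  simp only [pv_chi_eq, pv_same3, pv_same4, pv_same2]
  split_ifs with h1 h2 h3 h4 <;> simp_all

theorem pvTryAnk_val (h : List String) (idx size : Int) (r : List (String × List (List String)))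
    (hrec : ∀ r', split_huro_dfs h (idx+3) (size-1) r' = pvSim h (idx+3) (size-1)) :
    pvTryAnk h idx size r =
      (decide (idx + 1 < (h.length : Int) ∧ all_same [pvGetA h idx, pvGetA h (idx+1)] = true) &&
        pvSim h (idx+3) (size-1)) := by
  rw [pvTryAnk]
  split_ifs with hc hr
  · rw [hrec] at hr; simp [hc, hr]
  · rw [hrec] at hr; rw [Bool.not_eq_true] at hr; simp [hr]
  · simp [hc]

theorem pvTryMin_val (h : List String) (idx size : Int) (r : List (String × List (List String)))
    (hrec : ∀ r', split_huro_dfs h (idx+3) (size-1) r' = pvSim h (idx+3) (size-1)) :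
    pvTryMin h idx size r =
      ((decide (idx + 3 < (h.length : Int) ∧ all_same [pvGetA h idx, pvGetA h (idx+1), pvGetA h (idx+2), pvGetA h (idx+3)] = true) ||
        decide (idx + 1 < (h.length : Int) ∧ all_same [pvGetA h idx, pvGetA h (idx+1)] = true)) &&
        pvSim h (idx+3) (size-1)) := by
  rw [pvTryMin]
  split_ifs with hc hr
  · rw [hrec] at hr; simp [hc, hr]
  · rw [hrec] at hr; rw [Bool.not_eq_true] at hr
    rw [pvTryAnk_val h idx size r hrec]; simp [hr]
  · rw [pvTryAnk_val h idx size r hrec]; simp [hc]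

theorem pvTryPong_val (h : List String) (idx size : Int) (r : List (String × List (List String)))
    (hrec : ∀ r', split_huro_dfs h (idx+3) (size-1) r' = pvSim h (idx+3) (size-1)) :
    pvTryPong h idx size r =
      ((decide (idx + 2 < (h.length : Int) ∧ all_same [pvGetA h idx, pvGetA h (idx+1), pvGetA h (idx+2)] = true) ||
        decide (idx + 3 < (h.length : Int) ∧ all_same [pvGetA h idx, pvGetA h (idx+1), pvGetA h (idx+2), pvGetA h (idx+3)] = true) ||
        decide (idx + 1 < (h.length : Int) ∧ all_same [pvGetA h idx, pvGetA h (idx+1)] = true)) &&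
        pvSim h (idx+3) (size-1)) := by
  rw [pvTryPong]
  split_ifs with hc hr
  · rw [hrec] at hr; simp [hc, hr]
  · rw [hrec] at hr; rw [Bool.not_eq_true] at hr
    rw [pvTryMin_val h idx size r hrec]; simp [hr]
  · rw [pvTryMin_val h idx size r hrec]; simp [hc]

theorem pvTryChi_val (h : List String) (idx size : Int) (r : List (String × List (List String)))
    (hrec : ∀ r', split_huro_dfs h (idx+3) (size-1) r' = pvSim h (idx+3) (size-1)) :
    pvTryChi h idx size r =
      ((decide (idx + 2 < (h.length : Int) ∧ is_valid_chi (pvGetA h idx) (pvGetA h (idx+1)) (pvGetA h (idx+2)) = true) ||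
        decide (idx + 2 < (h.length : Int) ∧ all_same [pvGetA h idx, pvGetA h (idx+1), pvGetA h (idx+2)] = true) ||
        decide (idx + 3 < (h.length : Int) ∧ all_same [pvGetA h idx, pvGetA h (idx+1), pvGetA h (idx+2), pvGetA h (idx+3)] = true) ||
        decide (idx + 1 < (h.length : Int) ∧ all_same [pvGetA h idx, pvGetA h (idx+1)] = true)) &&
        pvSim h (idx+3) (size-1)) := by
  rw [pvTryChi]
  split_ifs with hc hr
  · rw [hrec] at hr; simp [hc, hr]
  · rw [hrec] at hr; rw [Bool.not_eq_true] at hr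
    rw [pvTryPong_val h idx size r hrec]; simp [hr]
  · rw [pvTryPong_val h idx size r hrec]; simp [hc]

theorem pv_split_eq_sim (h : List String) (μ : Nat) :
    ∀ (idx size : Int) (r : List (String × List (List String))),
      (h.length + 2 - idx).toNat = μ →
      split_huro_dfs h idx size r = pvSim h idx size := by
  induction μ using Nat.strong_induction_on with
  | _ μ IH =>
    intro idx size r hμ
    rw [split_huro_dfs, pvSim]
    by_cases hs : size = 0
    · simp [hs]
    · simp only [hs, if_false]
      by_cases hb : idx + 1 < (h.length : Int)
      · have IH' : ∀ r', split_huro_dfs h (idx+3) (size-1) r' = pvSim h (idx+3) (size-1) := by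
          intro r'
          exact IH ((h.length + 2 - (idx+3)).toNat) (by omega) (idx+3) (size-1) r' rfl
        -- A's four sequential branches all recurse on the same subproblem
        rw [pvTryChi_val h idx size r IH', pv_conds_eq_isSome]
        by_cases hsome : (pvMeldAt h idx).isSome = true
        · rw [dif_pos hsome, hsome, Bool.true_and]
        · rw [dif_neg hsome]
          rw [Bool.not_eq_true] at hsome
          rw [hsome, Bool.false_and]
      · -- idx+1 ≥ len: no branch can fire on either side
        rw [pvTryChi, pvTryPong, pvTryMin, pvTryAnk]
        have c1 : ¬ (idx + 2 < (h.length : Int) ∧ is_valid_chi (pvGetA h idx) (pvGetA h (idx+1)) (pvGetA h (idx+2)) = true) := by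
          rintro ⟨hlt, -⟩; omega
        have c2 : ¬ (idx + 2 < (h.length : Int) ∧ all_same [pvGetA h idx, pvGetA h (idx+1), pvGetA h (idx+2)] = true) := by
          rintro ⟨hlt, -⟩; omega
        have c3 : ¬ (idx + 3 < (h.length : Int) ∧ all_same [pvGetA h idx, pvGetA h (idx+1), pvGetA h (idx+2), pvGetA h (idx+3)] = true) := by
          rintro ⟨hlt, -⟩; omega
        have c4 : ¬ (idx + 1 < (h.length : Int) ∧ all_same [pvGetA h idx, pvGetA h (idx+1)] = true) := by
          rintro ⟨hlt, -⟩; omega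
        have hns : ¬ (pvMeldAt h idx).isSome = true := by
          rw [← pv_conds_eq_isSome]
          intro hcon
          simp only [Bool.or_eq_true, decide_eq_true_eq] at hcon
          rcases hcon with ((hd | hd) | hd) | hd <;>
            first
            | exact absurd hd.1 (by omega)
            | exact absurd hd (by omega)
        rw [dif_neg c1, dif_neg c2, dif_neg c3, dif_neg c4, dif_neg hns]

theorem pv_alt_eq_sim (h : List String) (μ : Nat) :
    ∀ (i s : Int) (acc : List (String × List String)),
      (h.length + 2 - i).toNat = μ →
      (match pvAltLoop h i s acc with
       | none => false
       | some (j, _) => decide (j = (h.length : Int))) = pvSim h i s := by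
  induction μ using Nat.strong_induction_on with
  | _ μ IH =>
    intro i s acc hμ
    rw [pvAltLoop, pvSim]
    by_cases hs : s = 0
    · simp [hs]
    · simp only [hs, if_false]
      cases hm : pvMeldAt h i with
      | none => simp
      | some kg =>
        have hb := pvMeldAt_bound h i kg hm
        simpa using IH ((h.length + 2 - (i+3)).toNat) (by omega) (i+3) (s-1) (acc ++ [kg]) rfl

theorem pv_alt_eq_sim' (h : List String) (idx size : Int) (r : List (String × List (List String))) :
    split_huro_dfs_alt h idx size r = pvSim h idx size := by
  rw [← pv_alt_eq_sim h ((h.length + 2 - idx).toNat) idx size [] rfl]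
  unfold split_huro_dfs_alt
  cases hm : pvAltLoop h idx size [] with
  | none => rfl
  | some p =>
    obtain ⟨j, melds⟩ := p
    by_cases hj : j = (h.length : Int) <;> simp [hj]

-- ===== VERDICT (by name: the statement is the Claim_ definition above) =====
theorem split_huro_dfs_spec : Claim_equal_split_huro_dfs := by
  intro huro_hand idx size result _ _
  unfold Spec_split_huro_dfs
  rw [pv_split_eq_sim huro_hand ((huro_hand.length + 2 - idx).toNat) idx size result rfl,
      pv_alt_eq_sim']
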